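-- pv_equiv track=rewrite | github.com/ashwanianand/marg | lunarLander/experiments/landerToGraph.py | allCellsBetween
-- ===== SOURCE A (Python) =====
-- def allCellsBetween(x1, x2, y1, y2, grid):
--     """
--     Returns all the cells which are contained by the rectangle created by x_1, x_2, y_1, and y_2
--     """
--     x_grid = grid[0]
--     y_grid = grid[1]
--     cells = set()
--     for i in range(len(x_grid) - 1):
--         for j in range(len(y_grid) - 1):
--             if (x1 <= x_grid[i] and x_grid[i + 1] <= x2) and \
--                (y1 <= y_grid[j] and y_grid[j + 1] <= y2):
--                 # If the cell is completely within the bounds, add it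
--                 cells.add((i, j))
--     return cells
-- ===== SOURCE B (Python) =====
-- def allCellsBetween(x1, x2, y1, y2, grid):
--     """
--     Returns all the cells which are contained by the rectangle created by x_1, x_2, y_1, and y_2
--     """
--     x_grid = grid[0]
--     y_grid = grid[1]
--     xs = [i for i in range(len(x_grid) - 1) if x1 <= x_grid[i] and x_grid[i + 1] <= x2]
--     ys = [j for j in range(len(y_grid) - 1) if y1 <= y_grid[j] and y_grid[j + 1] <= y2]
--     return {(i, j) for i in xs for j in ys}
-- ===== Notes on version B (the rewrite author's own statement) =====
-- stated objective: alternative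
-- what changed: Instead of testing every (i,j) pair in a double loop, B filters the valid x-indices and valid y-indices independently in two linear passes and returns their Cartesian product, since the membership test decomposes into an x-condition and a y-condition; when most cells pass, the output itself dominates the cost, so no speed-up is claimed.
import Mathlib
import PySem

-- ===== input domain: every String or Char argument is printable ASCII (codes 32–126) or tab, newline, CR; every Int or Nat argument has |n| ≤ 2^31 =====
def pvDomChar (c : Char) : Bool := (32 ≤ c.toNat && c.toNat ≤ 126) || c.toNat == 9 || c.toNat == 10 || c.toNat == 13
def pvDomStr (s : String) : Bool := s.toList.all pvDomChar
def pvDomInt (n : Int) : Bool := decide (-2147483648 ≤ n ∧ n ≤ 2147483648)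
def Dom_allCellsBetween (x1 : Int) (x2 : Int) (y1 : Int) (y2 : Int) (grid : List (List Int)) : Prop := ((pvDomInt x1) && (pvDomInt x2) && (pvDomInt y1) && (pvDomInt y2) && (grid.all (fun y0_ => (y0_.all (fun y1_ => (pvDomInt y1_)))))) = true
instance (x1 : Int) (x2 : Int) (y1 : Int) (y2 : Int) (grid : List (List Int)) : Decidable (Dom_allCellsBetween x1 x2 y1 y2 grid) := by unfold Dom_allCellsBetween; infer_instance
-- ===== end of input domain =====

-- B replaces the double loop's per-pair test by two independent index filters whose
-- Cartesian product is the answer (alternative decomposition; no speed claim).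
-- ===== PORT A =====
def allCellsBetween (x1 : Int) (x2 : Int) (y1 : Int) (y2 : Int) (grid : List (List Int)) : List (Int × Int) :=
  match grid with
  | xg :: yg :: _ =>
    (PySem.List.pyRange 0 ((xg.length : Int) - 1) 1).foldl (fun cells i =>
      (PySem.List.pyRange 0 ((yg.length : Int) - 1) 1).foldl (fun cells j =>
        if (x1 ≤ PySem.List.pyGetD xg i 0 ∧ PySem.List.pyGetD xg (i + 1) 0 ≤ x2) ∧
           (y1 ≤ PySem.List.pyGetD yg j 0 ∧ PySem.List.pyGetD yg (j + 1) 0 ≤ y2)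
        then PySem.Set.add cells (i, j) else cells) cells) PySem.Set.empty
  | _ => []  -- grid[0] / grid[1] raises IndexError here; excluded by Pre_

-- ===== PORT B =====
def allCellsBetween_alt (x1 : Int) (x2 : Int) (y1 : Int) (y2 : Int) (grid : List (List Int)) : List (Int × Int) :=
  let xg := PySem.List.pyGetD grid 0 []   -- grid[0]; IndexError (excluded by Pre_) when grid is too short
  let yg := PySem.List.pyGetD grid 1 []   -- grid[1]
  let xs := (PySem.List.pyRange 0 ((xg.length : Int) - 1) 1).filter (fun i =>
      decide (x1 ≤ PySem.List.pyGetD xg i 0 ∧ PySem.List.pyGetD xg (i + 1) 0 ≤ x2))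
  let ys := (PySem.List.pyRange 0 ((yg.length : Int) - 1) 1).filter (fun j =>
      decide (y1 ≤ PySem.List.pyGetD yg j 0 ∧ PySem.List.pyGetD yg (j + 1) 0 ≤ y2))
  PySem.Set.ofList (xs.flatMap (fun i => ys.map (fun j => (i, j))))

-- ===== PRECONDITION & SPEC =====
-- Pre_ excludes exactly the grids with fewer than two rows, where A raises IndexError on grid[1].
def Pre_allCellsBetween (x1 : Int) (x2 : Int) (y1 : Int) (y2 : Int) (grid : List (List Int)) : Prop := 2 ≤ grid.length
instance (x1 : Int) (x2 : Int) (y1 : Int) (y2 : Int) (grid : List (List Int)) : Decidable (Pre_allCellsBetween x1 x2 y1 y2 grid) := by unfold Pre_allCellsBetween; infer_instance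
def pvWitness_allCellsBetween : Int × Int × Int × Int × List (List Int) := (0, 2, 0, 2, [[0, 1, 2], [0, 1, 2]])
def Spec_allCellsBetween (x1 : Int) (x2 : Int) (y1 : Int) (y2 : Int) (grid : List (List Int)) (out : List (Int × Int)) : Prop := out = allCellsBetween_alt x1 x2 y1 y2 grid
instance (x1 : Int) (x2 : Int) (y1 : Int) (y2 : Int) (grid : List (List Int)) (out : List (Int × Int)) : Decidable (Spec_allCellsBetween x1 x2 y1 y2 grid out) := by unfold Spec_allCellsBetween; infer_instance

-- ===== CLAIM (what is proved, stated in full; the proofs are below) =====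
def Claim_equal_allCellsBetween : Prop := ∀ (x1 : Int) (x2 : Int) (y1 : Int) (y2 : Int) (grid : List (List Int)), Dom_allCellsBetween x1 x2 y1 y2 grid → Pre_allCellsBetween x1 x2 y1 y2 grid → Spec_allCellsBetween x1 x2 y1 y2 grid (allCellsBetween x1 x2 y1 y2 grid)

-- ===== LEMMAS AND PROOFS =====

-- the inner loop of A appends (i, j) for each passing j, provided no (i, j) is already present
theorem inner_fold_eq (i : Int) (P : Int → Bool) (J : List Int) (cells : List (Int × Int))
    (hJ : J.Nodup) (hfresh : ∀ j ∈ J, (i, j) ∉ cells) :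
    J.foldl (fun c j => if P j then PySem.Set.add c (i, j) else c) cells
      = cells ++ (J.filter P).map (fun j => (i, j)) := by
  induction J generalizing cells with
  | nil => simp
  | cons j J ih =>
    rcases List.nodup_cons.mp hJ with ⟨hj, hJ'⟩
    simp only [List.foldl_cons, List.filter_cons]
    by_cases hp : P j
    · rw [if_pos hp, if_pos hp, PySem.Set.add_of_not_mem (hfresh j (by simp))]
      rw [ih (cells ++ [(i, j)]) hJ' ?_]
      · simp
      · intro j' hj' hmem
        rcases List.mem_append.mp hmem with h | h
        · exact hfresh j' (by simp [hj']) h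
        · simp at h; exact hj (h ▸ hj')
    · rw [if_neg hp, if_neg hp, ih cells hJ' (fun j' hj' => hfresh j' (by simp [hj']))]

-- the outer loop of A concatenates the rows, provided no first component is reused
theorem outer_fold_eq (Px Py : Int → Bool) (J : List Int) (hJ : J.Nodup)
    (I : List Int) (cells : List (Int × Int))
    (hI : I.Nodup) (hfresh : ∀ i ∈ I, ∀ j, (i, j) ∉ cells) :
    I.foldl (fun c i =>
        J.foldl (fun c j => if Px i && Py j then PySem.Set.add c (i, j) else c) c) cells
      = cells ++ I.flatMap (fun i => (J.filter (fun j => Px i && Py j)).map (fun j => (i, j))) := by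
  induction I generalizing cells with
  | nil => simp
  | cons i I ih =>
    rcases List.nodup_cons.mp hI with ⟨hi, hI'⟩
    simp only [List.foldl_cons, List.flatMap_cons]
    rw [inner_fold_eq i _ J cells hJ (fun j hj => hfresh i (by simp) j)]
    rw [ih _ hI' ?_]
    · simp
    · intro i' hi' j hmem
      rcases List.mem_append.mp hmem with h | h
      · exact hfresh i' (by simp [hi']) j h
      · rcases List.mem_map.mp h with ⟨j', _, hj'⟩
        exact hi ((Prod.mk.injEq .. ▸ hj').1 ▸ hi')

-- a flatMap over a conjunctive filter is the flatMap over the filtered outer list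
theorem flatMap_filter_and (Px Py : Int → Bool) (I J : List Int) :
    I.flatMap (fun i => (J.filter (fun j => Px i && Py j)).map (fun j => (i, j)))
      = (I.filter Px).flatMap (fun i => (J.filter Py).map (fun j => (i, j))) := by
  induction I with
  | nil => simp
  | cons i I ih =>
    simp only [List.flatMap_cons, List.filter_cons]
    by_cases hp : Px i
    · rw [if_pos hp, List.flatMap_cons, ih]
      congr 1
      congr 1
      apply List.filter_congr
      intro j _; simp [hp]
    · rw [if_neg hp, ih]
      have : (fun j => Px i && Py j) = fun _ => false := by funext j; simp [hp]
      simp [this]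
  
-- the Cartesian product of two Nodup lists has no duplicates
theorem nodup_product (I J : List Int) (hI : I.Nodup) (hJ : J.Nodup) :
    (I.flatMap (fun i => J.map (fun j => (i, j)))).Nodup := by
  induction I with
  | nil => simp
  | cons i I ih =>
    rcases List.nodup_cons.mp hI with ⟨hi, hI'⟩
    simp only [List.flatMap_cons]
    apply List.Nodup.append
    · exact hJ.map (fun a b h => (Prod.mk.injEq .. ▸ h).2)
    · exact ih hI'
    · intro p hp hq
      rcases List.mem_map.mp hp with ⟨j, _, rfl⟩
      rcases List.mem_flatMap.mp hq with ⟨i', hi', hmem⟩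
      rcases List.mem_map.mp hmem with ⟨j', _, h⟩
      exact hi ((Prod.mk.injEq .. ▸ h).1 ▸ hi')

-- ===== VERDICT (by name: the statement is the Claim_ definition above) =====
theorem allCellsBetween_spec : Claim_equal_allCellsBetween := by
  intro x1 x2 y1 y2 grid _ hpre
  unfold Spec_allCellsBetween allCellsBetween allCellsBetween_alt
  match grid with
  | [] => exact absurd hpre (by simp [Pre_allCellsBetween])
  | [_] => exact absurd hpre (by simp [Pre_allCellsBetween])
  | xg :: yg :: rest =>
    have hg0 : PySem.List.pyGetD (xg :: yg :: rest) (0 : Int) [] = xg := by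
      have h : (0:Int) ≤ (rest.length:Int) + 1 := by omega
      simp [PySem.List.pyGetD, PySem.List.pyGet?, PySem.List.pyIdx?, h]
    have hg1 : PySem.List.pyGetD (xg :: yg :: rest) (1 : Int) [] = yg := by
      have h : (1:Int) ≤ (rest.length:Int) + 1 := by omega
      simp [PySem.List.pyGetD, PySem.List.pyGet?, PySem.List.pyIdx?, h]
    simp only [hg0, hg1]
    set Px : Int → Bool := fun i =>
      decide (x1 ≤ PySem.List.pyGetD xg i 0 ∧ PySem.List.pyGetD xg (i + 1) 0 ≤ x2) with hPx
    set Py : Int → Bool := fun j =>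
      decide (y1 ≤ PySem.List.pyGetD yg j 0 ∧ PySem.List.pyGetD yg (j + 1) 0 ≤ y2) with hPy
    have hA :
        (PySem.List.pyRange 0 ((xg.length : Int) - 1) 1).foldl (fun cells i =>
          (PySem.List.pyRange 0 ((yg.length : Int) - 1) 1).foldl (fun cells j =>
            if (x1 ≤ PySem.List.pyGetD xg i 0 ∧ PySem.List.pyGetD xg (i + 1) 0 ≤ x2) ∧
               (y1 ≤ PySem.List.pyGetD yg j 0 ∧ PySem.List.pyGetD yg (j + 1) 0 ≤ y2)
            then PySem.Set.add cells (i, j) else cells) cells) PySem.Set.empty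
          = (PySem.List.pyRange 0 ((xg.length : Int) - 1) 1).foldl (fun cells i =>
              (PySem.List.pyRange 0 ((yg.length : Int) - 1) 1).foldl (fun cells j =>
                if Px i && Py j then PySem.Set.add cells (i, j) else cells) cells)
              PySem.Set.empty := by
      apply PySem.List.foldl_congr_mem
      intro cells i _
      apply PySem.List.foldl_congr_mem
      intro c j _
      by_cases h : (x1 ≤ PySem.List.pyGetD xg i 0 ∧ PySem.List.pyGetD xg (i + 1) 0 ≤ x2) ∧
          (y1 ≤ PySem.List.pyGetD yg j 0 ∧ PySem.List.pyGetD yg (j + 1) 0 ≤ y2)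
      · rw [if_pos h, if_pos (by simp [hPx, hPy, h.1, h.2])]
      · rw [if_neg h, if_neg (by simp only [hPx, hPy, Bool.and_eq_true, decide_eq_true_eq]; tauto)]
    rw [hA, outer_fold_eq Px Py _ (PySem.List.nodup_pyRange_one _ _) _ PySem.Set.empty
          (PySem.List.nodup_pyRange_one _ _) (by simp [PySem.Set.empty]),
        flatMap_filter_and]
    rw [PySem.Set.ofList_eq_self_of_nodup _
          (nodup_product _ _ ((PySem.List.nodup_pyRange_one _ _).filter _) ((PySem.List.nodup_pyRange_one _ _).filter _))]
    simp [PySem.Set.empty]
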